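-- pv_equiv track=rewrite | github.com/vixay/cotc | helpers/organize_skill_icons.py | categorize_icons
-- ===== SOURCE A (Python) =====
-- def categorize_icons(icon_names):
--     """Categorize icons by their apparent function based on filename."""
--
--     categories = {
--         'stat_boosts': [],
--         'resistances': [],
--         'healing_recovery': [],
--         'damage_effects': [],
--         'weapon_skills': [],
--         'element_skills': [],
--         'special_effects': [],
--         'awakening': [],
--         'character_specific': []
--     }
--
--     for icon_name, count in icon_names.items():
--         name_lower = icon_name.lower()
--
--         # Stat boosts
--         if any(word in name_lower for word in ['boost', 'atk', 'def', 'spd', 'crit']):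
--             categories['stat_boosts'].append((icon_name, count))
--
--         # Resistances
--         elif any(word in name_lower for word in ['resilience', 'resistance']):
--             categories['resistances'].append((icon_name, count))
--
--         # Healing/Recovery
--         elif any(word in name_lower for word in ['healing', 'hp', 'sp', 'recovery', 'restoration', 'vim']):
--             categories['healing_recovery'].append((icon_name, count))
--
--         # Damage effects
--         elif any(word in name_lower for word in ['damage', 'critical', 'force', 'limit', 'potency']):
--             categories['damage_effects'].append((icon_name, count))
--
--         # Weapon skills
--         elif any(weapon in name_lower for weapon in ['sword', 'axe', 'bow', 'dagger', 'spear', 'staff', 'tome', 'fan']):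
--             categories['weapon_skills'].append((icon_name, count))
--
--         # Element skills
--         elif any(element in name_lower for element in ['fire', 'ice', 'lightning', 'wind', 'light', 'dark']):
--             categories['element_skills'].append((icon_name, count))
--
--         # Awakening
--         elif 'awakening' in name_lower:
--             categories['awakening'].append((icon_name, count))
--
--         # Special effects
--         elif any(word in name_lower for word in ['follow', 'jump', 'counter', 'barrier', 'incite', 'cover', 'analyze', 'buff', 'debuff']):
--             categories['special_effects'].append((icon_name, count))
--
--         # Character specific (names or unique abilities)
--         else:
--             categories['character_specific'].append((icon_name, count))
--
--     return categories
-- ===== SOURCE B (Python) =====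
-- KEYWORD_TABLE = [
--     ('stat_boosts', ['boost', 'atk', 'def', 'spd', 'crit']),
--     ('resistances', ['resilience', 'resistance']),
--     ('healing_recovery', ['healing', 'hp', 'sp', 'recovery', 'restoration', 'vim']),
--     ('damage_effects', ['damage', 'critical', 'force', 'limit', 'potency']),
--     ('weapon_skills', ['sword', 'axe', 'bow', 'dagger', 'spear', 'staff', 'tome', 'fan']),
--     ('element_skills', ['fire', 'ice', 'lightning', 'wind', 'light', 'dark']),
--     ('awakening', ['awakening']),
--     ('special_effects', ['follow', 'jump', 'counter', 'barrier', 'incite', 'cover', 'analyze', 'buff', 'debuff']),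
-- ]
--
-- CATEGORY_ORDER = ['stat_boosts', 'resistances', 'healing_recovery', 'damage_effects',
--                   'weapon_skills', 'element_skills', 'special_effects', 'awakening',
--                   'character_specific']
--
--
-- def _classify(name):
--     name_lower = name.lower()
--     for cat, words in KEYWORD_TABLE:
--         if any(w in name_lower for w in words):
--             return cat
--     return 'character_specific'
--
--
-- def categorize_icons(icon_names):
--     """Categorize icons by their apparent function based on filename."""
--     tagged = [(_classify(name), (name, count)) for name, count in icon_names.items()]
--     return {cat: [item for c, item in tagged if c == cat] for cat in CATEGORY_ORDER}
-- ===== Notes on version B (the rewrite author's own statement) =====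
-- stated objective: simpler
-- what changed: Replaces the nine-branch if/elif cascade appending into a pre-built dict with a keyword table and a classify-then-group decomposition: each name is tagged once with its category by a first-match table scan, and the result dict is built per category from the tagged list.
import Mathlib
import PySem

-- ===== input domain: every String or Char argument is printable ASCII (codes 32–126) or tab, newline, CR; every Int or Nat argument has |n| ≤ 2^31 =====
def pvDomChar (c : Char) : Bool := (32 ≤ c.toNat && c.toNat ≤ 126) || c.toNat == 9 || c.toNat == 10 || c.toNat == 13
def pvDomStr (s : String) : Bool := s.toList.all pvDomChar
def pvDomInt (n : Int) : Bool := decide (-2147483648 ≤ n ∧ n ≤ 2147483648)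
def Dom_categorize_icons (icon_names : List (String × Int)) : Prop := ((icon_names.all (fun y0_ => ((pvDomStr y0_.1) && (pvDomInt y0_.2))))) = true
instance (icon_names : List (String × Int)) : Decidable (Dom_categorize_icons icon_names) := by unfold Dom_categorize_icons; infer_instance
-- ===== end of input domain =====

-- B replaces A's nine-branch if/elif cascade with a keyword table: classify each name once, then group per category (same cost, simpler).

-- ===== PORT A =====
-- loop body of A's for-loop: the if/elif cascade appending into the dict
def pvCatAStep (d : PySem.Dict String (List (String × Int))) (p : String × Int) :
    PySem.Dict String (List (String × Int)) :=
  let name_lower := PySem.Str.lower p.1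
  if ["boost", "atk", "def", "spd", "crit"].any (fun w => PySem.Str.isIn w name_lower) then
    d.modify "stat_boosts" [] (· ++ [p])
  else if ["resilience", "resistance"].any (fun w => PySem.Str.isIn w name_lower) then
    d.modify "resistances" [] (· ++ [p])
  else if ["healing", "hp", "sp", "recovery", "restoration", "vim"].any (fun w => PySem.Str.isIn w name_lower) then
    d.modify "healing_recovery" [] (· ++ [p])
  else if ["damage", "critical", "force", "limit", "potency"].any (fun w => PySem.Str.isIn w name_lower) then
    d.modify "damage_effects" [] (· ++ [p])
  else if ["sword", "axe", "bow", "dagger", "spear", "staff", "tome", "fan"].any (fun w => PySem.Str.isIn w name_lower) then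
    d.modify "weapon_skills" [] (· ++ [p])
  else if ["fire", "ice", "lightning", "wind", "light", "dark"].any (fun w => PySem.Str.isIn w name_lower) then
    d.modify "element_skills" [] (· ++ [p])
  else if PySem.Str.isIn "awakening" name_lower then
    d.modify "awakening" [] (· ++ [p])
  else if ["follow", "jump", "counter", "barrier", "incite", "cover", "analyze", "buff", "debuff"].any (fun w => PySem.Str.isIn w name_lower) then
    d.modify "special_effects" [] (· ++ [p])
  else
    d.modify "character_specific" [] (· ++ [p])

def categorize_icons (icon_names : List (String × Int)) : List (String × List (String × Int)) :=
  let categories : PySem.Dict String (List (String × Int)) :=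
    PySem.Dict.mk [("stat_boosts", []), ("resistances", []), ("healing_recovery", []),
      ("damage_effects", []), ("weapon_skills", []), ("element_skills", []),
      ("special_effects", []), ("awakening", []), ("character_specific", [])]
  (icon_names.foldl pvCatAStep categories).items

-- ===== PORT B =====
def pvKeywordTable : List (String × List String) :=
  [("stat_boosts", ["boost", "atk", "def", "spd", "crit"]),
   ("resistances", ["resilience", "resistance"]),
   ("healing_recovery", ["healing", "hp", "sp", "recovery", "restoration", "vim"]),
   ("damage_effects", ["damage", "critical", "force", "limit", "potency"]),
   ("weapon_skills", ["sword", "axe", "bow", "dagger", "spear", "staff", "tome", "fan"]),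
   ("element_skills", ["fire", "ice", "lightning", "wind", "light", "dark"]),
   ("awakening", ["awakening"]),
   ("special_effects", ["follow", "jump", "counter", "barrier", "incite", "cover", "analyze", "buff", "debuff"])]

def pvCategoryOrder : List String :=
  ["stat_boosts", "resistances", "healing_recovery", "damage_effects", "weapon_skills",
   "element_skills", "special_effects", "awakening", "character_specific"]

def pvClassify (name : String) : String :=
  let name_lower := PySem.Str.lower name
  match pvKeywordTable.find? (fun cw => cw.2.any (fun w => PySem.Str.isIn w name_lower)) with
  | some cw => cw.1
  | none => "character_specific"

def categorize_icons_alt (icon_names : List (String × Int)) : List (String × List (String × Int)) :=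
  let tagged := icon_names.map (fun p => (pvClassify p.1, (p.1, p.2)))
  pvCategoryOrder.map (fun cat => (cat, (tagged.filter (fun t => t.1 == cat)).map (·.2)))

-- ===== PRECONDITION & SPEC =====
def Spec_categorize_icons (icon_names : List (String × Int)) (out : List (String × List (String × Int))) : Prop := out = categorize_icons_alt icon_names
instance (icon_names : List (String × Int)) (out : List (String × List (String × Int))) : Decidable (Spec_categorize_icons icon_names out) := by unfold Spec_categorize_icons; infer_instance

-- ===== CLAIM (what is proved, stated in full; the proofs are below) =====
def Claim_equal_categorize_icons : Prop := ∀ (icon_names : List (String × Int)), Dom_categorize_icons icon_names → Spec_categorize_icons icon_names (categorize_icons icon_names)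

-- ===== LEMMAS AND PROOFS =====
def pvGath (c : String) (l : List (String × Int)) : List (String × Int) :=
  ((l.map (fun p => (pvClassify p.1, (p.1, p.2)))).filter (fun t => t.1 == c)).map (·.2)

theorem pvGath_cons (c : String) (p : String × Int) (l : List (String × Int)) :
    pvGath c (p :: l) = (if pvClassify p.1 == c then [(p.1, p.2)] else []) ++ pvGath c l := by
  unfold pvGath
  simp only [List.map_cons, List.filter_cons]
  split_ifs <;> simp

def pvMkD (v1 v2 v3 v4 v5 v6 v7 v8 v9 : List (String × Int)) : PySem.Dict String (List (String × Int)) :=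
  PySem.Dict.mk [("stat_boosts", v1), ("resistances", v2), ("healing_recovery", v3),
      ("damage_effects", v4), ("weapon_skills", v5), ("element_skills", v6),
      ("special_effects", v7), ("awakening", v8), ("character_specific", v9)]

theorem pvClassify1 (p : String × Int)  (h1 : (["boost", "atk", "def", "spd", "crit"].any (fun w => PySem.Str.isIn w (PySem.Str.lower p.1))) = true) :
    pvClassify p.1 = "stat_boosts" := by
  simp only [pvClassify, pvKeywordTable, List.find?_cons, h1]

theorem pvStep1 (p : String × Int) (v1 v2 v3 v4 v5 v6 v7 v8 v9 : List (String × Int))  (h1 : (["boost", "atk", "def", "spd", "crit"].any (fun w => PySem.Str.isIn w (PySem.Str.lower p.1))) = true) :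
    pvCatAStep (pvMkD v1 v2 v3 v4 v5 v6 v7 v8 v9) p = pvMkD (v1 ++ [p]) v2 v3 v4 v5 v6 v7 v8 v9 := by
  unfold pvCatAStep pvMkD
  simp only [h1]
  simp [PySem.Dict.modify, PySem.Dict.insert, PySem.Dict.getD, PySem.Dict.get?, PySem.Dict.contains, List.find?]

theorem pvClassify2 (p : String × Int) (h1 : (["boost", "atk", "def", "spd", "crit"].any (fun w => PySem.Str.isIn w (PySem.Str.lower p.1))) = false) (h2 : (["resilience", "resistance"].any (fun w => PySem.Str.isIn w (PySem.Str.lower p.1))) = true) :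
    pvClassify p.1 = "resistances" := by
  simp only [pvClassify, pvKeywordTable, List.find?_cons, h1, h2]

theorem pvStep2 (p : String × Int) (v1 v2 v3 v4 v5 v6 v7 v8 v9 : List (String × Int)) (h1 : (["boost", "atk", "def", "spd", "crit"].any (fun w => PySem.Str.isIn w (PySem.Str.lower p.1))) = false) (h2 : (["resilience", "resistance"].any (fun w => PySem.Str.isIn w (PySem.Str.lower p.1))) = true) :
    pvCatAStep (pvMkD v1 v2 v3 v4 v5 v6 v7 v8 v9) p = pvMkD v1 (v2 ++ [p]) v3 v4 v5 v6 v7 v8 v9 := by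
  unfold pvCatAStep pvMkD
  simp only [h1, h2]
  simp [PySem.Dict.modify, PySem.Dict.insert, PySem.Dict.getD, PySem.Dict.get?, PySem.Dict.contains, List.find?]

theorem pvClassify3 (p : String × Int) (h1 : (["boost", "atk", "def", "spd", "crit"].any (fun w => PySem.Str.isIn w (PySem.Str.lower p.1))) = false) (h2 : (["resilience", "resistance"].any (fun w => PySem.Str.isIn w (PySem.Str.lower p.1))) = false) (h3 : (["healing", "hp", "sp", "recovery", "restoration", "vim"].any (fun w => PySem.Str.isIn w (PySem.Str.lower p.1))) = true) :
    pvClassify p.1 = "healing_recovery" := by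
  simp only [pvClassify, pvKeywordTable, List.find?_cons, h1, h2, h3]

theorem pvStep3 (p : String × Int) (v1 v2 v3 v4 v5 v6 v7 v8 v9 : List (String × Int)) (h1 : (["boost", "atk", "def", "spd", "crit"].any (fun w => PySem.Str.isIn w (PySem.Str.lower p.1))) = false) (h2 : (["resilience", "resistance"].any (fun w => PySem.Str.isIn w (PySem.Str.lower p.1))) = false) (h3 : (["healing", "hp", "sp", "recovery", "restoration", "vim"].any (fun w => PySem.Str.isIn w (PySem.Str.lower p.1))) = true) :
    pvCatAStep (pvMkD v1 v2 v3 v4 v5 v6 v7 v8 v9) p = pvMkD v1 v2 (v3 ++ [p]) v4 v5 v6 v7 v8 v9 := by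
  unfold pvCatAStep pvMkD
  simp only [h1, h2, h3]
  simp [PySem.Dict.modify, PySem.Dict.insert, PySem.Dict.getD, PySem.Dict.get?, PySem.Dict.contains, List.find?]

theorem pvClassify4 (p : String × Int) (h1 : (["boost", "atk", "def", "spd", "crit"].any (fun w => PySem.Str.isIn w (PySem.Str.lower p.1))) = false) (h2 : (["resilience", "resistance"].any (fun w => PySem.Str.isIn w (PySem.Str.lower p.1))) = false) (h3 : (["healing", "hp", "sp", "recovery", "restoration", "vim"].any (fun w => PySem.Str.isIn w (PySem.Str.lower p.1))) = false) (h4 : (["damage", "critical", "force", "limit", "potency"].any (fun w => PySem.Str.isIn w (PySem.Str.lower p.1))) = true) :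
    pvClassify p.1 = "damage_effects" := by
  simp only [pvClassify, pvKeywordTable, List.find?_cons, h1, h2, h3, h4]

theorem pvStep4 (p : String × Int) (v1 v2 v3 v4 v5 v6 v7 v8 v9 : List (String × Int)) (h1 : (["boost", "atk", "def", "spd", "crit"].any (fun w => PySem.Str.isIn w (PySem.Str.lower p.1))) = false) (h2 : (["resilience", "resistance"].any (fun w => PySem.Str.isIn w (PySem.Str.lower p.1))) = false) (h3 : (["healing", "hp", "sp", "recovery", "restoration", "vim"].any (fun w => PySem.Str.isIn w (PySem.Str.lower p.1))) = false) (h4 : (["damage", "critical", "force", "limit", "potency"].any (fun w => PySem.Str.isIn w (PySem.Str.lower p.1))) = true) :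
    pvCatAStep (pvMkD v1 v2 v3 v4 v5 v6 v7 v8 v9) p = pvMkD v1 v2 v3 (v4 ++ [p]) v5 v6 v7 v8 v9 := by
  unfold pvCatAStep pvMkD
  simp only [h1, h2, h3, h4]
  simp [PySem.Dict.modify, PySem.Dict.insert, PySem.Dict.getD, PySem.Dict.get?, PySem.Dict.contains, List.find?]

theorem pvClassify5 (p : String × Int) (h1 : (["boost", "atk", "def", "spd", "crit"].any (fun w => PySem.Str.isIn w (PySem.Str.lower p.1))) = false) (h2 : (["resilience", "resistance"].any (fun w => PySem.Str.isIn w (PySem.Str.lower p.1))) = false) (h3 : (["healing", "hp", "sp", "recovery", "restoration", "vim"].any (fun w => PySem.Str.isIn w (PySem.Str.lower p.1))) = false) (h4 : (["damage", "critical", "force", "limit", "potency"].any (fun w => PySem.Str.isIn w (PySem.Str.lower p.1))) = false) (h5 : (["sword", "axe", "bow", "dagger", "spear", "staff", "tome", "fan"].any (fun w => PySem.Str.isIn w (PySem.Str.lower p.1))) = true) :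
    pvClassify p.1 = "weapon_skills" := by
  simp only [pvClassify, pvKeywordTable, List.find?_cons, h1, h2, h3, h4, h5]

theorem pvStep5 (p : String × Int) (v1 v2 v3 v4 v5 v6 v7 v8 v9 : List (String × Int)) (h1 : (["boost", "atk", "def", "spd", "crit"].any (fun w => PySem.Str.isIn w (PySem.Str.lower p.1))) = false) (h2 : (["resilience", "resistance"].any (fun w => PySem.Str.isIn w (PySem.Str.lower p.1))) = false) (h3 : (["healing", "hp", "sp", "recovery", "restoration", "vim"].any (fun w => PySem.Str.isIn w (PySem.Str.lower p.1))) = false) (h4 : (["damage", "critical", "force", "limit", "potency"].any (fun w => PySem.Str.isIn w (PySem.Str.lower p.1))) = false) (h5 : (["sword", "axe", "bow", "dagger", "spear", "staff", "tome", "fan"].any (fun w => PySem.Str.isIn w (PySem.Str.lower p.1))) = true) :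
    pvCatAStep (pvMkD v1 v2 v3 v4 v5 v6 v7 v8 v9) p = pvMkD v1 v2 v3 v4 (v5 ++ [p]) v6 v7 v8 v9 := by
  unfold pvCatAStep pvMkD
  simp only [h1, h2, h3, h4, h5]
  simp [PySem.Dict.modify, PySem.Dict.insert, PySem.Dict.getD, PySem.Dict.get?, PySem.Dict.contains, List.find?]

theorem pvClassify6 (p : String × Int) (h1 : (["boost", "atk", "def", "spd", "crit"].any (fun w => PySem.Str.isIn w (PySem.Str.lower p.1))) = false) (h2 : (["resilience", "resistance"].any (fun w => PySem.Str.isIn w (PySem.Str.lower p.1))) = false) (h3 : (["healing", "hp", "sp", "recovery", "restoration", "vim"].any (fun w => PySem.Str.isIn w (PySem.Str.lower p.1))) = false) (h4 : (["damage", "critical", "force", "limit", "potency"].any (fun w => PySem.Str.isIn w (PySem.Str.lower p.1))) = false) (h5 : (["sword", "axe", "bow", "dagger", "spear", "staff", "tome", "fan"].any (fun w => PySem.Str.isIn w (PySem.Str.lower p.1))) = false) (h6 : (["fire", "ice", "lightning", "wind", "light", "dark"].any (fun w => PySem.Str.isIn w (PySem.Str.lower p.1))) = true) :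
    pvClassify p.1 = "element_skills" := by
  simp only [pvClassify, pvKeywordTable, List.find?_cons, h1, h2, h3, h4, h5, h6]

theorem pvStep6 (p : String × Int) (v1 v2 v3 v4 v5 v6 v7 v8 v9 : List (String × Int)) (h1 : (["boost", "atk", "def", "spd", "crit"].any (fun w => PySem.Str.isIn w (PySem.Str.lower p.1))) = false) (h2 : (["resilience", "resistance"].any (fun w => PySem.Str.isIn w (PySem.Str.lower p.1))) = false) (h3 : (["healing", "hp", "sp", "recovery", "restoration", "vim"].any (fun w => PySem.Str.isIn w (PySem.Str.lower p.1))) = false) (h4 : (["damage", "critical", "force", "limit", "potency"].any (fun w => PySem.Str.isIn w (PySem.Str.lower p.1))) = false) (h5 : (["sword", "axe", "bow", "dagger", "spear", "staff", "tome", "fan"].any (fun w => PySem.Str.isIn w (PySem.Str.lower p.1))) = false) (h6 : (["fire", "ice", "lightning", "wind", "light", "dark"].any (fun w => PySem.Str.isIn w (PySem.Str.lower p.1))) = true) :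
    pvCatAStep (pvMkD v1 v2 v3 v4 v5 v6 v7 v8 v9) p = pvMkD v1 v2 v3 v4 v5 (v6 ++ [p]) v7 v8 v9 := by
  unfold pvCatAStep pvMkD
  simp only [h1, h2, h3, h4, h5, h6]
  simp [PySem.Dict.modify, PySem.Dict.insert, PySem.Dict.getD, PySem.Dict.get?, PySem.Dict.contains, List.find?]

theorem pvClassify7 (p : String × Int) (h1 : (["boost", "atk", "def", "spd", "crit"].any (fun w => PySem.Str.isIn w (PySem.Str.lower p.1))) = false) (h2 : (["resilience", "resistance"].any (fun w => PySem.Str.isIn w (PySem.Str.lower p.1))) = false) (h3 : (["healing", "hp", "sp", "recovery", "restoration", "vim"].any (fun w => PySem.Str.isIn w (PySem.Str.lower p.1))) = false) (h4 : (["damage", "critical", "force", "limit", "potency"].any (fun w => PySem.Str.isIn w (PySem.Str.lower p.1))) = false) (h5 : (["sword", "axe", "bow", "dagger", "spear", "staff", "tome", "fan"].any (fun w => PySem.Str.isIn w (PySem.Str.lower p.1))) = false) (h6 : (["fire", "ice", "lightning", "wind", "light", "dark"].any (fun w => PySem.Str.isIn w (PySem.Str.lower p.1))) = false) (h7 : (PySem.Str.isIn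 "awakening" (PySem.Str.lower p.1)) = true) :
    pvClassify p.1 = "awakening" := by
  simp only [pvClassify, pvKeywordTable, List.find?_cons, h1, h2, h3, h4, h5, h6]
  simp only [List.any_cons, List.any_nil, Bool.or_false, h7]

theorem pvStep7 (p : String × Int) (v1 v2 v3 v4 v5 v6 v7 v8 v9 : List (String × Int)) (h1 : (["boost", "atk", "def", "spd", "crit"].any (fun w => PySem.Str.isIn w (PySem.Str.lower p.1))) = false) (h2 : (["resilience", "resistance"].any (fun w => PySem.Str.isIn w (PySem.Str.lower p.1))) = false) (h3 : (["healing", "hp", "sp", "recovery", "restoration", "vim"].any (fun w => PySem.Str.isIn w (PySem.Str.lower p.1))) = false) (h4 : (["damage", "critical", "force", "limit", "potency"].any (fun w => PySem.Str.isIn w (PySem.Str.lower p.1))) = false) (h5 : (["sword", "axe", "bow", "dagger", "spear", "staff", "tome", "fan"].any (fun w => PySem.Str.isIn w (PySem.Str.lower p.1))) = false) (h6 : (["fire", "ice", "lightning", "wind", "light", "dark"].any (fun w => PySem.Str.isIn w (PySem.Str.lower p.1))) = false) (h7 : (PySem.Str.isIn "awakening" (PySem.Str.lower p.1)) = true) 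:
    pvCatAStep (pvMkD v1 v2 v3 v4 v5 v6 v7 v8 v9) p = pvMkD v1 v2 v3 v4 v5 v6 v7 (v8 ++ [p]) v9 := by
  unfold pvCatAStep pvMkD
  simp only [h1, h2, h3, h4, h5, h6, h7]
  simp [PySem.Dict.modify, PySem.Dict.insert, PySem.Dict.getD, PySem.Dict.get?, PySem.Dict.contains, List.find?]

theorem pvClassify8 (p : String × Int) (h1 : (["boost", "atk", "def", "spd", "crit"].any (fun w => PySem.Str.isIn w (PySem.Str.lower p.1))) = false) (h2 : (["resilience", "resistance"].any (fun w => PySem.Str.isIn w (PySem.Str.lower p.1))) = false) (h3 : (["healing", "hp", "sp", "recovery", "restoration", "vim"].any (fun w => PySem.Str.isIn w (PySem.Str.lower p.1))) = false) (h4 : (["damage", "critical", "force", "limit", "potency"].any (fun w => PySem.Str.isIn w (PySem.Str.lower p.1))) = false) (h5 : (["sword", "axe", "bow", "dagger", "spear", "staff", "tome", "fan"].any (fun w => PySem.Str.isIn w (PySem.Str.lower p.1))) = false) (h6 : (["fire", "ice", "lightning", "wind", "light", "dark"].any (fun w => PySem.Str.isIn w (PySem.Str.lower p.1))) = false) (h7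 : (PySem.Str.isIn "awakening" (PySem.Str.lower p.1)) = false) (h8 : (["follow", "jump", "counter", "barrier", "incite", "cover", "analyze", "buff", "debuff"].any (fun w => PySem.Str.isIn w (PySem.Str.lower p.1))) = true) :
    pvClassify p.1 = "special_effects" := by
  simp only [pvClassify, pvKeywordTable, List.find?_cons, h1, h2, h3, h4, h5, h6]
  simp only [List.any_cons, List.any_nil, Bool.or_false, h7, h8]

theorem pvStep8 (p : String × Int) (v1 v2 v3 v4 v5 v6 v7 v8 v9 : List (String × Int)) (h1 : (["boost", "atk", "def", "spd", "crit"].any (fun w => PySem.Str.isIn w (PySem.Str.lower p.1))) = false) (h2 : (["resilience", "resistance"].any (fun w => PySem.Str.isIn w (PySem.Str.lower p.1))) = false) (h3 : (["healing", "hp", "sp", "recovery", "restoration", "vim"].any (fun w => PySem.Str.isIn w (PySem.Str.lower p.1))) = false) (h4 : (["damage", "critical", "force", "limit", "potency"].any (fun w => PySem.Str.isIn w (PySem.Str.lower p.1))) = false) (h5 : (["sword", "axe", "bow", "dagger", "spear", "staff", "tome", "fan"].any (fun w => PySem.Str.isIn w (PySem.Str.lower p.1))) = false) (h6 : (["fire",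 "ice", "lightning", "wind", "light", "dark"].any (fun w => PySem.Str.isIn w (PySem.Str.lower p.1))) = false) (h7 : (PySem.Str.isIn "awakening" (PySem.Str.lower p.1)) = false) (h8 : (["follow", "jump", "counter", "barrier", "incite", "cover", "analyze", "buff", "debuff"].any (fun w => PySem.Str.isIn w (PySem.Str.lower p.1))) = true) :
    pvCatAStep (pvMkD v1 v2 v3 v4 v5 v6 v7 v8 v9) p = pvMkD v1 v2 v3 v4 v5 v6 (v7 ++ [p]) v8 v9 := by
  unfold pvCatAStep pvMkD
  simp only [h1, h2, h3, h4, h5, h6, h7, h8]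
  simp [PySem.Dict.modify, PySem.Dict.insert, PySem.Dict.getD, PySem.Dict.get?, PySem.Dict.contains, List.find?]

theorem pvClassify9 (p : String × Int) (h1 : (["boost", "atk", "def", "spd", "crit"].any (fun w => PySem.Str.isIn w (PySem.Str.lower p.1))) = false) (h2 : (["resilience", "resistance"].any (fun w => PySem.Str.isIn w (PySem.Str.lower p.1))) = false) (h3 : (["healing", "hp", "sp", "recovery", "restoration", "vim"].any (fun w => PySem.Str.isIn w (PySem.Str.lower p.1))) = false) (h4 : (["damage", "critical", "force", "limit", "potency"].any (fun w => PySem.Str.isIn w (PySem.Str.lower p.1))) = false) (h5 : (["sword", "axe", "bow", "dagger", "spear", "staff", "tome", "fan"].any (fun w => PySem.Str.isIn w (PySem.Str.lower p.1))) = false) (h6 : (["fire", "ice", "lightning", "wind", "light", "dark"].any (fun w => PySem.Str.isIn w (PySem.Str.lower p.1))) = false) (h7 : (PySem.Str.isIn "awakening" (PySem.Str.lower p.1)) = false) (h8 : (["follow", "jump", "counter", "barrier", "incite", "cover", "analyze", "buff", "debuff"].any (fun w => PySem.Str.isIn w (PySem.Str.lower p.1))) = false) :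
    pvClassify p.1 = "character_specific" := by
  simp only [pvClassify, pvKeywordTable, List.find?_cons, h1, h2, h3, h4, h5, h6]
  simp only [List.any_cons, List.any_nil, Bool.or_false, h7, h8, List.find?_nil]

theorem pvStep9 (p : String × Int) (v1 v2 v3 v4 v5 v6 v7 v8 v9 : List (String × Int)) (h1 : (["boost", "atk", "def", "spd", "crit"].any (fun w => PySem.Str.isIn w (PySem.Str.lower p.1))) = false) (h2 : (["resilience", "resistance"].any (fun w => PySem.Str.isIn w (PySem.Str.lower p.1))) = false) (h3 : (["healing", "hp", "sp", "recovery", "restoration", "vim"].any (fun w => PySem.Str.isIn w (PySem.Str.lower p.1))) = false) (h4 : (["damage", "critical", "force", "limit", "potency"].any (fun w => PySem.Str.isIn w (PySem.Str.lower p.1))) = false) (h5 : (["sword", "axe", "bow", "dagger", "spear", "staff", "tome", "fan"].any (fun w => PySem.Str.isIn w (PySem.Str.lower p.1))) = false) (h6 : (["fire", "ice", "lightning", "wind", "light", "dark"].any (fun w => PySem.Str.isIn w (PySem.Str.lower p.1))) = false) (h7 : (PySem.Str.isIn "awakening" (PySem.Str.lower p.1)) = false) (h8 : (["follow", "jump",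 "counter", "barrier", "incite", "cover", "analyze", "buff", "debuff"].any (fun w => PySem.Str.isIn w (PySem.Str.lower p.1))) = false) :
    pvCatAStep (pvMkD v1 v2 v3 v4 v5 v6 v7 v8 v9) p = pvMkD v1 v2 v3 v4 v5 v6 v7 v8 (v9 ++ [p]) := by
  unfold pvCatAStep pvMkD
  simp only [h1, h2, h3, h4, h5, h6, h7, h8]
  simp [PySem.Dict.modify, PySem.Dict.insert, PySem.Dict.getD, PySem.Dict.get?, PySem.Dict.contains, List.find?]

set_option maxHeartbeats 1000000 in
theorem pvFoldItems (l : List (String × Int)) : ∀ (v1 v2 v3 v4 v5 v6 v7 v8 v9 : List (String × Int)),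
    (l.foldl pvCatAStep (pvMkD v1 v2 v3 v4 v5 v6 v7 v8 v9)).items
    = [("stat_boosts", v1 ++ pvGath "stat_boosts" l), ("resistances", v2 ++ pvGath "resistances" l),
       ("healing_recovery", v3 ++ pvGath "healing_recovery" l), ("damage_effects", v4 ++ pvGath "damage_effects" l),
       ("weapon_skills", v5 ++ pvGath "weapon_skills" l), ("element_skills", v6 ++ pvGath "element_skills" l),
       ("special_effects", v7 ++ pvGath "special_effects" l), ("awakening", v8 ++ pvGath "awakening" l),
       ("character_specific", v9 ++ pvGath "character_specific" l)] := by
  induction l with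
  | nil => intros; simp [pvGath, pvMkD]
  | cons p l ih =>
    intro v1 v2 v3 v4 v5 v6 v7 v8 v9
    cases h1 : (["boost", "atk", "def", "spd", "crit"].any (fun w => PySem.Str.isIn w (PySem.Str.lower p.1))) with
    | true =>
      rw [List.foldl_cons, pvStep1 p v1 v2 v3 v4 v5 v6 v7 v8 v9 h1, ih]
      simp [pvGath_cons, pvClassify1 p h1]
    | false =>
      cases h2 : (["resilience", "resistance"].any (fun w => PySem.Str.isIn w (PySem.Str.lower p.1))) with
      | true =>
      rw [List.foldl_cons, pvStep2 p v1 v2 v3 v4 v5 v6 v7 v8 v9 h1 h2, ih]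
      simp [pvGath_cons, pvClassify2 p h1 h2]
      | false =>
        cases h3 : (["healing", "hp", "sp", "recovery", "restoration", "vim"].any (fun w => PySem.Str.isIn w (PySem.Str.lower p.1))) with
        | true =>
      rw [List.foldl_cons, pvStep3 p v1 v2 v3 v4 v5 v6 v7 v8 v9 h1 h2 h3, ih]
      simp [pvGath_cons, pvClassify3 p h1 h2 h3]
        | false =>
          cases h4 : (["damage", "critical", "force", "limit", "potency"].any (fun w => PySem.Str.isIn w (PySem.Str.lower p.1))) with
          | true =>
      rw [List.foldl_cons, pvStep4 p v1 v2 v3 v4 v5 v6 v7 v8 v9 h1 h2 h3 h4, ih]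
      simp [pvGath_cons, pvClassify4 p h1 h2 h3 h4]
          | false =>
            cases h5 : (["sword", "axe", "bow", "dagger", "spear", "staff", "tome", "fan"].any (fun w => PySem.Str.isIn w (PySem.Str.lower p.1))) with
            | true =>
      rw [List.foldl_cons, pvStep5 p v1 v2 v3 v4 v5 v6 v7 v8 v9 h1 h2 h3 h4 h5, ih]
      simp [pvGath_cons, pvClassify5 p h1 h2 h3 h4 h5]
            | false =>
              cases h6 : (["fire", "ice", "lightning", "wind", "light", "dark"].any (fun w => PySem.Str.isIn w (PySem.Str.lower p.1))) with
              | true =>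
      rw [List.foldl_cons, pvStep6 p v1 v2 v3 v4 v5 v6 v7 v8 v9 h1 h2 h3 h4 h5 h6, ih]
      simp [pvGath_cons, pvClassify6 p h1 h2 h3 h4 h5 h6]
              | false =>
                cases h7 : (PySem.Str.isIn "awakening" (PySem.Str.lower p.1)) with
                | true =>
      rw [List.foldl_cons, pvStep7 p v1 v2 v3 v4 v5 v6 v7 v8 v9 h1 h2 h3 h4 h5 h6 h7, ih]
      simp [pvGath_cons, pvClassify7 p h1 h2 h3 h4 h5 h6 h7]
                | false =>
                  cases h8 : (["follow", "jump", "counter", "barrier", "incite", "cover", "analyze", "buff", "debuff"].any (fun w => PySem.Str.isIn w (PySem.Str.lower p.1))) with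
                  | true =>
      rw [List.foldl_cons, pvStep8 p v1 v2 v3 v4 v5 v6 v7 v8 v9 h1 h2 h3 h4 h5 h6 h7 h8, ih]
      simp [pvGath_cons, pvClassify8 p h1 h2 h3 h4 h5 h6 h7 h8]
                  | false =>
      rw [List.foldl_cons, pvStep9 p v1 v2 v3 v4 v5 v6 v7 v8 v9 h1 h2 h3 h4 h5 h6 h7 h8, ih]
      simp [pvGath_cons, pvClassify9 p h1 h2 h3 h4 h5 h6 h7 h8]

-- ===== VERDICT (by name: the statement is the Claim_ definition above) =====
theorem categorize_icons_spec : Claim_equal_categorize_icons := by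
  intro l _
  unfold Spec_categorize_icons categorize_icons categorize_icons_alt
  rw [show (PySem.Dict.mk [("stat_boosts", ([] : List (String × Int))), ("resistances", []), ("healing_recovery", []),
      ("damage_effects", []), ("weapon_skills", []), ("element_skills", []),
      ("special_effects", []), ("awakening", []), ("character_specific", [])]) = pvMkD [] [] [] [] [] [] [] [] [] from rfl,
    pvFoldItems]
  simp [pvCategoryOrder, pvGath]
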